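-- pv_equiv track=rewrite | github.com/Tsukuyomi03/PythonBegginerProjects | Acronym Generator/acronym_generator.py | generate_acronym
-- ===== SOURCE A (Python) =====
-- def generate_acronym(phrase):
--     if not phrase.strip():
--         return ""
--
--     words = phrase.strip().split()
--     acronym = ""
--
--     for word in words:
--         if word and word[0].isalpha():
--             acronym += word[0].upper()
--
--     return acronym
-- ===== SOURCE B (Python) =====
-- def generate_acronym(phrase):
--     result = []
--     prev_is_space = True
--     for ch in phrase:
--         if not ch.isspace() and prev_is_space:
--             if ch.isalpha():
--                 result.append(ch.upper())
--         prev_is_space = ch.isspace()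
--     return ''.join(result)
-- ===== Notes on version B (the rewrite author's own statement) =====
-- stated objective: alternative
-- what changed: Replaced strip+split into a word list with a single left-to-right character scan that detects word starts via a prev_is_space flag and joins the collected initials once.
import Mathlib
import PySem

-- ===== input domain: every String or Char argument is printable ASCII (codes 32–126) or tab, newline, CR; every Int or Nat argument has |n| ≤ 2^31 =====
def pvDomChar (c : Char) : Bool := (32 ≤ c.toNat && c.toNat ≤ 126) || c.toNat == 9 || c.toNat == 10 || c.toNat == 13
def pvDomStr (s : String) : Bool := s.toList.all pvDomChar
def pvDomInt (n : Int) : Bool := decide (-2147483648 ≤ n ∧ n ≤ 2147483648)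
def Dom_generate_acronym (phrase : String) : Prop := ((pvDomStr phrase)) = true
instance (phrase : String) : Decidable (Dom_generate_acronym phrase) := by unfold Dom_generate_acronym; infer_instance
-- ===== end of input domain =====

-- B replaces strip+split into a word list by a single character scan with a prev_is_space flag (alternative decomposition, same O(n) cost).

-- ===== PORT A =====
-- for word in words: if word and word[0].isalpha(): acronym += word[0].upper()
def pvAStep (acc : List Char) (w : List Char) : List Char :=
  match w with
  | [] => acc
  | c :: _ => if PySem.Chars.isalpha c then acc ++ [PySem.Chars.upperChar c] else acc

def generate_acronym (phrase : String) : String :=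
  let s := phrase.toList
  if (PySem.Chars.strip s).isEmpty then ""
  else String.ofList ((PySem.Chars.split₀ (PySem.Chars.strip s)).foldl pvAStep [])

-- ===== PORT B =====
-- one left-to-right scan: prev_is_space flag, append upper of word-start alpha chars
def pvScan (cs : List Char) (prev : Bool) (acc : List Char) : List Char :=
  match cs with
  | [] => acc
  | c :: rest =>
      pvScan rest (PySem.Chars.isspace c)
        (if ¬ (PySem.Chars.isspace c) = true ∧ prev = true then
           (if PySem.Chars.isalpha c then acc ++ [PySem.Chars.upperChar c] else acc)
         else acc)

def generate_acronym_alt (phrase : String) : String :=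
  String.ofList (pvScan phrase.toList true [])

-- ===== PRECONDITION & SPEC =====
def Spec_generate_acronym (phrase : String) (out : String) : Prop := out = generate_acronym_alt phrase
instance (phrase : String) (out : String) : Decidable (Spec_generate_acronym phrase out) := by unfold Spec_generate_acronym; infer_instance

-- ===== CLAIM (what is proved, stated in full; the proofs are below) =====
def Claim_equal_generate_acronym : Prop := ∀ (phrase : String), Dom_generate_acronym phrase → Spec_generate_acronym phrase (generate_acronym phrase)

-- ===== LEMMAS AND PROOFS =====

-- reference acronym of a char list: pvAcro at a word boundary, pvSkip inside a word
mutual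
def pvAcro : List Char → List Char
  | [] => []
  | c :: r =>
      if PySem.Chars.isspace c then pvAcro r
      else (if PySem.Chars.isalpha c then [PySem.Chars.upperChar c] else []) ++ pvSkip r
def pvSkip : List Char → List Char
  | [] => []
  | c :: r => if PySem.Chars.isspace c then pvAcro r else pvSkip r
end

theorem pvScan_eq (cs : List Char) : ∀ acc : List Char,
    pvScan cs true acc = acc ++ pvAcro cs ∧ pvScan cs false acc = acc ++ pvSkip cs := by
  induction cs with
  | nil => intro acc; simp [pvScan, pvAcro, pvSkip]
  | cons c r ih =>
      intro acc
      by_cases hs : PySem.Chars.isspace c = true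
      · simp [pvScan, pvAcro, pvSkip, hs, ih]
      · by_cases ha : PySem.Chars.isalpha c = true
        · simp [pvScan, pvAcro, pvSkip, hs, ha, ih]
        · simp [pvScan, pvAcro, pvSkip, hs, ha, ih]

theorem pvGoNil (cur : List Char) (acc : List (List Char)) :
    PySem.Chars.split₀.go [] cur acc
      = if cur.isEmpty = true then acc.reverse else (cur.reverse :: acc).reverse := by
  rw [PySem.Chars.split₀.go.eq_def]

theorem pvGoCons (c : Char) (r cur : List Char) (acc : List (List Char)) :
    PySem.Chars.split₀.go (c :: r) cur acc
      = if PySem.Chars.isspace c = true then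
          (if cur.isEmpty = true then PySem.Chars.split₀.go r [] acc
           else PySem.Chars.split₀.go r [] (cur.reverse :: acc))
        else PySem.Chars.split₀.go r (c :: cur) acc := by
  rw [PySem.Chars.split₀.go.eq_def]

theorem pvGo_acc (cs : List Char) : ∀ cur acc,
    PySem.Chars.split₀.go cs cur acc = acc.reverse ++ PySem.Chars.split₀.go cs cur [] := by
  induction cs with
  | nil =>
      intro cur acc
      by_cases hc : cur.isEmpty
      · simp [pvGoNil, hc]
      · simp [pvGoNil, hc]
  | cons c r ih =>
      intro cur acc
      by_cases hs : PySem.Chars.isspace c = true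
      · by_cases hc : cur.isEmpty
        · rw [pvGoCons, pvGoCons, if_pos hs, if_pos hs, if_pos hc, if_pos hc]
          exact ih [] acc
        · rw [pvGoCons, pvGoCons, if_pos hs, if_pos hs, if_neg hc, if_neg hc]
          rw [ih [] (cur.reverse :: acc), ih [] [cur.reverse]]
          simp
      · rw [pvGoCons, pvGoCons, if_neg hs, if_neg hs]
        exact ih (c :: cur) acc

-- fold of A's step = flatMap of the per-word initial
def pvInit (w : List Char) : List Char :=
  match w with
  | [] => []
  | c :: _ => if PySem.Chars.isalpha c then [PySem.Chars.upperChar c] else []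

theorem pvFoldA (ws : List (List Char)) : ∀ acc,
    ws.foldl pvAStep acc = acc ++ ws.flatMap pvInit := by
  induction ws with
  | nil => intro acc; simp
  | cons w t ih =>
      intro acc
      cases w with
      | nil => simp [pvAStep, pvInit, ih]
      | cons c ww =>
          by_cases ha : PySem.Chars.isalpha c = true
          · simp [pvAStep, pvInit, ha, ih]
          · simp [pvAStep, pvInit, ha, ih]

-- words of split₀.go, flatMapped through pvInit, compute pvAcro / pvSkip
theorem pvWords (cs : List Char) :
    (PySem.Chars.split₀.go cs [] []).flatMap pvInit = pvAcro cs ∧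
    (∀ cur b, (PySem.Chars.split₀.go cs (cur ++ [b]) []).flatMap pvInit
        = pvInit [b] ++ pvSkip cs) := by
  induction cs with
  | nil =>
      constructor
      · simp [pvGoNil, pvAcro]
      · intro cur b
        simp [pvGoNil, pvInit, pvSkip]
  | cons c r ih =>
      by_cases hs : PySem.Chars.isspace c = true
      · constructor
        · simp [pvGoCons, hs, pvAcro, ih.1]
        · intro cur b
          simp only [pvGoCons, hs, if_true]
          have hne : ((cur ++ [b]).isEmpty) = false := by simp
          rw [hne]
          simp only [Bool.false_eq_true, if_false]
          rw [pvGo_acc r [] [(cur ++ [b]).reverse]]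
          simp only [List.reverse_cons, List.reverse_nil, List.nil_append,
            List.reverse_append, List.singleton_append, List.flatMap_cons]
          rw [ih.1]
          simp [pvInit, pvSkip, hs]
      · constructor
        · simp only [pvGoCons, hs, Bool.false_eq_true, if_false]
          have := ih.2 [] c
          simp only [List.nil_append] at this
          rw [this]
          simp [pvAcro, hs, pvInit]
        · intro cur b
          simp only [pvGoCons, hs, Bool.false_eq_true, if_false]
          have := ih.2 (c :: cur) b
          simp only [List.cons_append] at this
          rw [this]
          simp [pvSkip, hs]

-- stripping does not change the acronym
theorem pvAcro_all_space (sp : List Char) (h : ∀ c ∈ sp, PySem.Chars.isspace c = true) :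
    pvAcro sp = [] ∧ pvSkip sp = [] := by
  induction sp with
  | nil => simp [pvAcro, pvSkip]
  | cons c r ih =>
      have hc := h c (by simp)
      have ihr := ih (fun x hx => h x (by simp [hx]))
      simp [pvAcro, pvSkip, hc, ihr.1]

theorem pvAcro_append_space (t sp : List Char) (h : ∀ c ∈ sp, PySem.Chars.isspace c = true) :
    pvAcro (t ++ sp) = pvAcro t ∧ pvSkip (t ++ sp) = pvSkip t := by
  induction t with
  | nil => simpa using pvAcro_all_space sp h
  | cons c r ih =>
      by_cases hs : PySem.Chars.isspace c = true
      · simp [pvAcro, pvSkip, hs, ih.1]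
      · simp [pvAcro, pvSkip, hs, ih.2]

theorem pvAcro_lstrip (s : List Char) : pvAcro (PySem.Chars.lstrip s) = pvAcro s := by
  induction s with
  | nil => rfl
  | cons c r ih =>
      by_cases hs : PySem.Chars.isspace c = true
      · simpa [PySem.Chars.lstrip, hs, pvAcro] using ih
      · simp [PySem.Chars.lstrip, hs]

theorem pvAcro_rstrip (s : List Char) : pvAcro (PySem.Chars.rstrip s) = pvAcro s := by
  have hdecomp : s = PySem.Chars.rstrip s ++ (s.reverse.takeWhile PySem.Chars.isspace).reverse := by
    simp only [PySem.Chars.rstrip]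
    conv_lhs => rw [← List.reverse_reverse s,
      ← List.takeWhile_append_dropWhile (p := PySem.Chars.isspace) (l := s.reverse),
      List.reverse_append]
  have hsp : ∀ c ∈ (s.reverse.takeWhile PySem.Chars.isspace).reverse, PySem.Chars.isspace c = true := by
    intro c hc
    exact List.mem_takeWhile_imp (List.mem_reverse.mp hc)
  conv_rhs => rw [hdecomp]
  exact (pvAcro_append_space _ _ hsp).1.symm

theorem pvAcro_strip (s : List Char) : pvAcro (PySem.Chars.strip s) = pvAcro s := by
  simp [PySem.Chars.strip, pvAcro_rstrip, pvAcro_lstrip]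

-- ===== VERDICT (by name: the statement is the Claim_ definition above) =====
theorem generate_acronym_spec : Claim_equal_generate_acronym := by
  intro phrase _
  unfold Spec_generate_acronym generate_acronym generate_acronym_alt
  rw [(pvScan_eq phrase.toList []).1, List.nil_append]
  by_cases h : (PySem.Chars.strip phrase.toList).isEmpty = true
  · simp only [h, if_true]
    have h0 : PySem.Chars.strip phrase.toList = [] := by simpa using h
    have : pvAcro phrase.toList = [] := by
      rw [← pvAcro_strip, h0]; rfl
    rw [this]
  · simp only [h, Bool.false_eq_true, if_false]
    rw [pvFoldA, List.nil_append]
    rw [show PySem.Chars.split₀ (PySem.Chars.strip phrase.toList)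
          = PySem.Chars.split₀.go (PySem.Chars.strip phrase.toList) [] [] from rfl]
    rw [(pvWords (PySem.Chars.strip phrase.toList)).1, pvAcro_strip]
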